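-- pv_equiv track=rewrite | github.com/dailythm/dailythm-GwonYeong | 2022/Nov/09(Wed)/3. 한 번만 등장한 문자.py | solution
-- ===== SOURCE A (Python) =====
-- def solution(s):
--     answer = ''
--     s = list(s)
--     s.sort()
--     for i in range(97 , 123):
--
--         if s.count(chr(i)) ==1:
--             answer += chr(i)
--     return answer
-- ===== SOURCE B (Python) =====
-- def solution(s):
--     # Single grouping pass over sorted(s): emit each lowercase letter whose run has length 1.
--     def runs(t):
--         if not t:
--             return ''
--         c = t[0]
--         i = 1
--         while i < len(t) and t[i] == c:
--             i += 1
--         head = c if i == 1 and 'a' <= c <= 'z' else ''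
--         return head + runs(t[i:])
--     return runs(sorted(s))
-- ===== Notes on version B (the rewrite author's own statement) =====
-- stated objective: faster
-- what changed: B sorts the string once and then makes a single run-detection pass over the sorted characters (recursing run by run), emitting each lowercase letter whose run has length exactly 1, instead of A's 26 separate full-list count() scans.
import Mathlib
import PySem

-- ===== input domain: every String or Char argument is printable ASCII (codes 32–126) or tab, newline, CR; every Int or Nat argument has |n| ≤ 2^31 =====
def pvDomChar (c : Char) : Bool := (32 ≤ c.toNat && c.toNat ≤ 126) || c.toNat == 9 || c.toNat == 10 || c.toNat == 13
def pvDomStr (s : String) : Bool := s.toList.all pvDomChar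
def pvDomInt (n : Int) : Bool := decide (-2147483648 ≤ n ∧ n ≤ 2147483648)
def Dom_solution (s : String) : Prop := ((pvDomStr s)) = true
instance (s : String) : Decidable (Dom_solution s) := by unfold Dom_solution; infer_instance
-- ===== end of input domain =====

-- B replaces A's 26 full count() scans over the sorted list by ONE run-detection pass
-- over sorted(s), emitting each lowercase letter whose run has length exactly 1.

-- ===== PORT A =====
-- answer = ''; s = list(s); s.sort(); for i in range(97,123): if s.count(chr(i)) == 1: answer += chr(i)
def solution (s : String) : String :=
  String.mk ((PySem.List.pyRange 97 123 1).foldl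
    (fun acc i =>
      if (PySem.List.sorted s.toList (fun x => x) false).count (Char.ofNat i.toNat) = 1
      then acc ++ [Char.ofNat i.toNat] else acc) [])

-- ===== PORT B =====
-- def runs(t): if not t: return ''; c = t[0]; advance i over the run of c;
--   head = c if i == 1 and 'a' <= c <= 'z' else ''; return head + runs(t[i:])
def runsB (t : List Char) : List Char :=
  match t with
  | [] => []
  | c :: rest =>
      (if (rest.takeWhile (fun x => x == c)).length = 0 ∧ 'a' ≤ c ∧ c ≤ 'z'
       then [c] else [])
      ++ runsB (rest.dropWhile (fun x => x == c))
termination_by t.length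
decreasing_by
  simpa using Nat.lt_succ_of_le (List.length_dropWhile_le _ _)

-- return runs(sorted(s))
def solution_alt (s : String) : String :=
  String.mk (runsB (PySem.List.sorted s.toList (fun x => x) false))

-- ===== PRECONDITION & SPEC =====
def Spec_solution (s : String) (out : String) : Prop := out = solution_alt s
instance (s : String) (out : String) : Decidable (Spec_solution s out) := by unfold Spec_solution; infer_instance

-- ===== CLAIM (what is proved, stated in full; the proofs are below) =====
def Claim_equal_solution : Prop := ∀ (s : String), Dom_solution s → Spec_solution s (solution s)

-- ===== LEMMAS AND PROOFS =====
lemma char_le_iff (a b : Char) : a ≤ b ↔ a.toNat ≤ b.toNat := by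
  rw [Char.le_def, UInt32.le_iff_toNat_le]; rfl

lemma toNat_ofNat_lower (i : Nat) (h : i < 26) : (Char.ofNat (97 + i)).toNat = 97 + i := by
  rw [Char.toNat_ofNat, if_pos]
  exact Or.inl (by omega)

-- run-detection over a (≤)-sorted list = filter by "lowercase ∧ global count 1"
lemma runsB_eq_filter (t : List Char) (hs : t.Pairwise (· ≤ ·)) :
    runsB t = t.filter (fun x => decide (('a' ≤ x ∧ x ≤ 'z') ∧ t.count x = 1)) := by
  induction t using runsB.induct with
  | case1 => simp [runsB]
  | case2 c rest ih =>
    have hsplit : rest = rest.takeWhile (fun x => x == c) ++ rest.dropWhile (fun x => x == c) :=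
      (List.takeWhile_append_dropWhile (p := fun x => x == c) (l := rest)).symm
    set a := rest.takeWhile (fun x => x == c) with ha
    set b := rest.dropWhile (fun x => x == c) with hb
    have hmem_a : ∀ x ∈ a, x = c := by
      intro x hx
      rw [ha] at hx
      exact eq_of_beq (List.mem_takeWhile_imp (p := fun y => y == c) hx)
    have hrest_ge : ∀ x ∈ rest, c ≤ x := by
      intro x hx; exact (List.pairwise_cons.mp hs).1 x hx
    have hb_gt : ∀ x ∈ b, c < x := by
      cases hbv : b with
      | nil => simp
      | cons d b' =>
        have hd_ne : ¬ (d == c) = true := by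
          have h0 := List.head?_dropWhile_not (p := fun x => x == c) (l := rest)
          rw [← hb, hbv] at h0
          intro hc
          exact absurd hc (by simpa using h0)
        have hd_mem : d ∈ rest := by
          rw [hsplit, hbv]; simp
        have hdc : d ≠ c := fun h => hd_ne (by rw [h]; exact BEq.rfl)
        have hcd : c < d := lt_of_le_of_ne (hrest_ge d hd_mem) (fun h => hdc h.symm)
        have hb_pair : (d :: b').Pairwise (· ≤ ·) := by
          rw [← hbv, hb]
          exact ((List.pairwise_cons.mp hs).2.sublist (List.dropWhile_sublist _))
        intro x hx
        rcases List.mem_cons.mp hx with h | h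
        · exact h ▸ hcd
        · exact lt_of_lt_of_le hcd ((List.pairwise_cons.mp hb_pair).1 x h)
    have hc_notin_b : c ∉ b := fun h => lt_irrefl c (hb_gt c h)
    have hca : a.count c = a.length :=
      List.count_eq_length.mpr (by intro x hx; simpa [eq_comm] using hmem_a x hx)
    have hcount_c : (c :: (a ++ b)).count c = 1 + a.length := by
      rw [List.count_cons, List.count_append, hca, List.count_eq_zero.mpr hc_notin_b]
      simp; omega
    have hb_pair : b.Pairwise (· ≤ ·) :=
      ((List.pairwise_cons.mp hs).2.sublist (List.dropWhile_sublist _))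
    have hcount_b : ∀ x ∈ b, (c :: (a ++ b)).count x = b.count x := by
      intro x hx
      have hxc : x ≠ c := fun h => lt_irrefl c (h ▸ hb_gt x hx)
      have hxa : x ∉ a := fun h => hxc (hmem_a x h)
      rw [List.count_cons, List.count_append, List.count_eq_zero.mpr hxa]
      simp [Ne.symm hxc]
    have hfilter_a :
        a.filter (fun x => decide (('a' ≤ x ∧ x ≤ 'z') ∧ (c :: (a ++ b)).count x = 1)) = [] := by
      rw [List.filter_eq_nil_iff]
      intro x hx
      have hxc := hmem_a x hx
      have hlen : a.length ≥ 1 := List.length_pos_of_mem hx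
      simp only [decide_eq_true_eq, not_and]
      intro _
      rw [hxc, hcount_c]; omega
    have hfilter_b :
        b.filter (fun x => decide (('a' ≤ x ∧ x ≤ 'z') ∧ (c :: (a ++ b)).count x = 1))
          = b.filter (fun x => decide (('a' ≤ x ∧ x ≤ 'z') ∧ b.count x = 1)) := by
      apply List.filter_congr
      intro x hx
      rw [hcount_b x hx]
    rw [runsB, ← ha, ← hb, ih hb_pair]
    conv_rhs => rw [hsplit]
    rw [List.filter_cons, List.filter_append, hfilter_a, hfilter_b]
    by_cases hone : a.length = 0 ∧ 'a' ≤ c ∧ c ≤ 'z'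
    · rw [if_pos hone, if_pos (by simp only [decide_eq_true_eq]; exact ⟨⟨hone.2.1, hone.2.2⟩, by rw [hcount_c]; omega⟩)]
      simp
    · rw [if_neg hone, if_neg (fun hdec => ?_)]
      rw [decide_eq_true_eq] at hdec
      rw [hcount_c] at hdec
      exact hone ⟨by omega, hdec.1.1, hdec.1.2⟩

-- the canonical list both ports compute
def canonical (t : List Char) : List Char :=
  ((List.range 26).filter (fun k => decide (t.count (Char.ofNat (97 + k)) = 1))).map
    (fun k => Char.ofNat (97 + k))

lemma range_A : PySem.List.pyRange 97 123 1
    = (List.range 26).map (fun k : Nat => ((97 + k : Nat) : Int)) := by decide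

-- A-side: the 26-letter loop builds exactly `canonical`
lemma solution_eq_canonical (s : String) :
    solution s = String.mk (canonical (PySem.List.sorted s.toList (fun x => x) false)) := by
  unfold solution canonical
  rw [PySem.List.foldl_append_ite
      (p := fun i : Int => (PySem.List.sorted s.toList (fun x => x) false).count (Char.ofNat i.toNat) = 1)
      (f := fun i : Int => Char.ofNat i.toNat)]
  rw [range_A, List.filter_map, List.map_map, List.nil_append]
  have h1 : ((fun i : Int => Char.ofNat i.toNat) ∘ fun k : Nat => ((97 + k : Nat) : Int))
      = (fun k : Nat => Char.ofNat (97 + k)) := by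
    funext k
    have : ((97 : Int) + (k : Int)).toNat = 97 + k := by omega
    simp [Function.comp, this]
  have h2 : ((fun x : Int => decide ((PySem.List.sorted s.toList (fun x => x)).count (Char.ofNat x.toNat) = 1)) ∘ fun k : Nat => ((97 + k : Nat) : Int))
      = (fun k : Nat => decide ((PySem.List.sorted s.toList (fun x => x)).count (Char.ofNat (97 + k)) = 1)) := by
    funext k
    have : ((97 : Int) + (k : Int)).toNat = 97 + k := by omega
    simp [Function.comp, this]
  rw [h1, h2]

-- B-side filter = canonical, by uniqueness of the (≤)-sorted nodup arrangement
lemma filter_eq_canonical (t : List Char) (hs : t.Pairwise (· ≤ ·)) :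
    t.filter (fun x => decide (('a' ≤ x ∧ x ≤ 'z') ∧ t.count x = 1)) = canonical t := by
  set p : Char → Bool := fun x => decide (('a' ≤ x ∧ x ≤ 'z') ∧ t.count x = 1) with hp
  have hnodupL : (t.filter p).Nodup := by
    rw [List.nodup_iff_count_le_one]
    intro x
    rcases Nat.eq_zero_or_pos ((t.filter p).count x) with h | h
    · omega
    · have hx : x ∈ t.filter p := List.count_pos_iff.mp h
      have hpx : p x = true := List.of_mem_filter hx
      have h1 : t.count x = 1 := by
        simp only [hp, decide_eq_true_eq] at hpx; exact hpx.2
      calc (t.filter p).count x ≤ t.count x := List.Sublist.count_le x List.filter_sublist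
        _ = 1 := h1
  have hnodupR : (canonical t).Nodup := by
    unfold canonical
    apply List.Nodup.map_on
    · intro i hi j hj hij
      have hi26 : i < 26 := List.mem_range.mp (List.mem_filter.mp hi).1
      have hj26 : j < 26 := List.mem_range.mp (List.mem_filter.mp hj).1
      have := congrArg Char.toNat hij
      rw [toNat_ofNat_lower i hi26, toNat_ofNat_lower j hj26] at this
      omega
    · exact (List.nodup_range).filter _
  have hmemL : ∀ x, x ∈ t.filter p ↔ (('a' ≤ x ∧ x ≤ 'z') ∧ t.count x = 1) := by
    intro x
    rw [List.mem_filter]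
    constructor
    · intro ⟨_, hpx⟩; simpa [hp] using hpx
    · intro h
      exact ⟨List.count_pos_iff.mp (by omega), by simpa [hp] using h⟩
  have hmemR : ∀ x, x ∈ canonical t ↔ (('a' ≤ x ∧ x ≤ 'z') ∧ t.count x = 1) := by
    intro x
    unfold canonical
    rw [List.mem_map]
    constructor
    · rintro ⟨k, hk, rfl⟩
      have hk26 : k < 26 := List.mem_range.mp (List.mem_filter.mp hk).1
      have hcnt := (List.mem_filter.mp hk).2
      have hv := toNat_ofNat_lower k hk26
      refine ⟨⟨?_, ?_⟩, by simpa using hcnt⟩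
      · rw [char_le_iff]; simp [hv]
      · rw [char_le_iff]; simp [hv]; omega
    · rintro ⟨⟨hlo, hhi⟩, hcnt⟩
      rw [char_le_iff] at hlo hhi
      have hlo' : 97 ≤ x.toNat := by simpa using hlo
      have hhi' : x.toNat ≤ 122 := by simpa using hhi
      refine ⟨x.toNat - 97, ?_, ?_⟩
      · rw [List.mem_filter, List.mem_range]
        have hxeq : Char.ofNat (97 + (x.toNat - 97)) = x := by
          have : 97 + (x.toNat - 97) = x.toNat := by omega
          rw [this, Char.ofNat_toNat]
        exact ⟨by omega, by simp [hxeq, hcnt]⟩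
      · have : 97 + (x.toNat - 97) = x.toNat := by omega
        rw [this, Char.ofNat_toNat]
  have hperm : (t.filter p).Perm (canonical t) := by
    rw [List.perm_ext_iff_of_nodup hnodupL hnodupR]
    intro x; rw [hmemL, hmemR]
  have hsortL : (t.filter p).Pairwise (· ≤ ·) := hs.sublist List.filter_sublist
  have hsortR : (canonical t).Pairwise (· ≤ ·) := by
    unfold canonical
    rw [List.pairwise_map]
    have hbase : ((List.range 26).filter
        (fun k => decide (t.count (Char.ofNat (97 + k)) = 1))).Pairwise (· < ·) :=
      (List.pairwise_lt_range).filter _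
    refine hbase.imp_of_mem ?_
    intro i j hi hj hij
    have hi26 : i < 26 := List.mem_range.mp (List.mem_filter.mp hi).1
    have hj26 : j < 26 := List.mem_range.mp (List.mem_filter.mp hj).1
    rw [char_le_iff, toNat_ofNat_lower i hi26, toNat_ofNat_lower j hj26]
    omega
  exact hperm.eq_of_pairwise' hsortL hsortR

-- ===== VERDICT (by name: the statement is the Claim_ definition above) =====
theorem solution_spec : Claim_equal_solution := by
  intro s _
  unfold Spec_solution solution_alt
  rw [solution_eq_canonical]
  congr 1
  rw [runsB_eq_filter _ (PySem.List.sorted_pairwise s.toList (fun x => x)),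
    filter_eq_canonical _ (PySem.List.sorted_pairwise s.toList (fun x => x))]
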